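-- pv_equiv track=rewrite | github.com/ispoleet/ctf-writeups | 0ctf_quals_2020/happy_tree/happy_tree_crack.py | crack_dword
-- ===== SOURCE A (Python) =====
-- def crack_dword(buf_i):
--     for i in range(100000):
--         # Recover b
--         chunk = buf_i & 0x1F
--         b = chunk
--         for pos in range(5, 31, 5):
--             chunk = ((buf_i ^ (chunk << pos)) >> pos) & 0x1F
--             b |= chunk << pos
--
--         b &= 0xFFFFFFFF
--
--         # Recover a
--         a = b ^ (b >> 17)
--
--         # Recover buf_i-1
--         chunk = a & 0x1FFF
--         buf_i = chunk
--         for pos in range(13, 31, 13):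
--             chunk = ((a ^ (chunk << pos)) >> pos) & 0x1FFF
--             buf_i |= chunk << pos
--
--         buf_i &= 0xFFFFFFFF
--
--
--     return buf_i
-- ===== SOURCE B (Python) =====
-- def crack_dword(buf_i):
--     for _ in range(100000):
--         # invert b' = b ^ (b << 5) (mod 2**32) by fixed-point refinement
--         b = buf_i
--         for _ in range(7):
--             b = (buf_i ^ (b << 5)) & 0xFFFFFFFF
--         # invert the xorshift-right step
--         a = b ^ (b >> 17)
--         # invert a' = a ^ (a << 13) (mod 2**32) the same way
--         buf_i = a
--         for _ in range(3):
--             buf_i = (a ^ (buf_i << 13)) & 0xFFFFFFFF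
--     return buf_i
-- ===== Notes on version B (the rewrite author's own statement) =====
-- stated objective: simpler
-- what changed: Each of A's two chunk-peeling inner loops (chunk extraction plus or-accumulation into the word) is replaced by the standard fixed-point refinement inverse of a left-shift-xor: the estimate starts at the word itself and is repeatedly recomputed as the word xored with the shifted previous estimate, masked to dword width, until every bit of the inverse is reconstructed, so no chunk bookkeeping is needed.
import Mathlib
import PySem

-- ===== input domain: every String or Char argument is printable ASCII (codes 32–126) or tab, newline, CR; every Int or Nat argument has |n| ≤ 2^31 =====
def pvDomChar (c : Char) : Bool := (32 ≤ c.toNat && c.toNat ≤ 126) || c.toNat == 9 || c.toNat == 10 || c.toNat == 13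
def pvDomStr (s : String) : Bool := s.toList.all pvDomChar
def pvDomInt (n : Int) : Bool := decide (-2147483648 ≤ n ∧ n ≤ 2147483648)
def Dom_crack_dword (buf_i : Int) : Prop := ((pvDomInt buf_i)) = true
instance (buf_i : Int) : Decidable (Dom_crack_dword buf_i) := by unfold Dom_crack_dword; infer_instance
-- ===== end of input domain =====

-- B replaces A's two chunk-peeling inner loops by fixed-point refinement of the shift-xor inverse; same values, simpler bookkeeping.

-- ===== PORT A =====
-- one iteration of A's outer loop, transliterated statement by statement
def crack_dword_step (buf_i : Int) : Int :=
  -- Recover b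
  let chunk := PySem.Int.band buf_i 0x1F
  let b := chunk
  let cb := (PySem.List.pyRange 5 31 5).foldl
    (fun (cb : Int × Int) (pos : Int) =>
      let chunk := PySem.Int.band ((PySem.Int.bxor buf_i (cb.1 <<< pos.toNat)) >>> pos.toNat) 0x1F
      (chunk, PySem.Int.bor cb.2 (chunk <<< pos.toNat)))
    (chunk, b)
  let b := PySem.Int.band cb.2 0xFFFFFFFF
  -- Recover a
  let a := PySem.Int.bxor b (b >>> (17:Nat))
  -- Recover buf_i-1
  let chunk2 := PySem.Int.band a 0x1FFF
  let buf' := chunk2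
  let cb2 := (PySem.List.pyRange 13 31 13).foldl
    (fun (cb : Int × Int) (pos : Int) =>
      let c := PySem.Int.band ((PySem.Int.bxor a (cb.1 <<< pos.toNat)) >>> pos.toNat) 0x1FFF
      (c, PySem.Int.bor cb.2 (c <<< pos.toNat)))
    (chunk2, buf')
  PySem.Int.band cb2.2 0xFFFFFFFF

def crack_dword (buf_i : Int) : Int :=
  (PySem.List.pyRange 0 100000 1).foldl (fun buf _ => crack_dword_step buf) buf_i

-- ===== PORT B =====
def crack_dword_alt_step (buf_i : Int) : Int :=
  let b := (PySem.List.pyRange 0 7 1).foldl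
    (fun (b : Int) _ => PySem.Int.band (PySem.Int.bxor buf_i (b <<< (5:Nat))) 0xFFFFFFFF) buf_i
  let a := PySem.Int.bxor b (b >>> (17:Nat))
  (PySem.List.pyRange 0 3 1).foldl
    (fun (y : Int) _ => PySem.Int.band (PySem.Int.bxor a (y <<< (13:Nat))) 0xFFFFFFFF) a

def crack_dword_alt (buf_i : Int) : Int :=
  (PySem.List.pyRange 0 100000 1).foldl (fun buf _ => crack_dword_alt_step buf) buf_i

-- ===== PRECONDITION & SPEC =====
def Spec_crack_dword (buf_i : Int) (out : Int) : Prop := out = crack_dword_alt buf_i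
instance (buf_i : Int) (out : Int) : Decidable (Spec_crack_dword buf_i out) := by unfold Spec_crack_dword; infer_instance

-- ===== CLAIM (what is proved, stated in full; the proofs are below) =====
def Claim_equal_crack_dword : Prop := ∀ (buf_i : Int), Dom_crack_dword buf_i → Spec_crack_dword buf_i (crack_dword buf_i)

-- ===== LEMMAS AND PROOFS =====

-- Int.testBit toolkit relating PySem's Python-exact bitwise ops to per-bit facts
lemma ibit_ext {a b : Int} (h : ∀ i, a.testBit i = b.testBit i) : a = b := by
  cases a with
  | ofNat m =>
    cases b with
    | ofNat n =>
      have : m = n := Nat.eq_of_testBit_eq (fun i => by simpa [Int.testBit] using h i)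
      simp [this]
    | negSucc n =>
      exfalso
      have h1 := h (m + n)
      simp [Int.testBit] at h1
      rw [Nat.testBit_lt_two_pow, Nat.testBit_lt_two_pow] at h1
      · simp at h1
      · calc n ≤ m + n := Nat.le_add_left n m
             _ < 2 ^ (m+n) := Nat.lt_two_pow_self
      · calc m ≤ m + n := Nat.le_add_right m n
             _ < 2 ^ (m+n) := Nat.lt_two_pow_self
  | negSucc m =>
    cases b with
    | ofNat n =>
      exfalso
      have h1 := h (m + n)
      simp [Int.testBit] at h1
      rw [Nat.testBit_lt_two_pow, Nat.testBit_lt_two_pow] at h1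
      · simp at h1
      · calc n ≤ m + n := Nat.le_add_left n m
             _ < 2 ^ (m+n) := Nat.lt_two_pow_self
      · calc m ≤ m + n := Nat.le_add_right m n
             _ < 2 ^ (m+n) := Nat.lt_two_pow_self
    | negSucc n =>
      have : m = n := Nat.eq_of_testBit_eq (fun i => by
        have := h i; simpa [Int.testBit] using this)
      simp [this]

lemma ldiff_zero_left (n : Nat) : Nat.ldiff 0 n = 0 := by
  apply Nat.zero_of_testBit_eq_false
  intro i; simp [Nat.testBit_ldiff]

lemma ldiff_add_land (m n : Nat) : m.ldiff n + (m &&& n) = m := by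
  induction m using Nat.binaryRec generalizing n with
  | zero => simp [ldiff_zero_left]
  | bit a m ih =>
    rw [← Nat.bit_bodd_div2 n, Nat.ldiff_bit, Nat.land_bit]
    have := ih n.div2
    cases a <;> cases n.bodd <;> simp [Nat.bit_val] <;> omega

lemma sub_land_eq_ldiff (m n : Nat) : m - (m &&& n) = m.ldiff n := by
  have := ldiff_add_land m n; omega

lemma pys_bxor (a b : Int) : PySem.Int.bxor a b = Int.xor a b := by
  cases a with
  | ofNat m => cases b with
    | ofNat n => simp [PySem.Int.bxor, Int.xor]
    | negSucc n =>
      simp [PySem.Int.bxor, Int.xor, Int.negSucc_eq]; omega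
  | negSucc m => cases b with
    | ofNat n =>
      simp [PySem.Int.bxor, Int.xor, Int.negSucc_eq]; omega
    | negSucc n =>
      simp [PySem.Int.bxor, Int.xor, Int.negSucc_eq]; omega

lemma pys_band (a b : Int) : PySem.Int.band a b = Int.land a b := by
  cases a with
  | ofNat m => cases b with
    | ofNat n => simp [PySem.Int.band, Int.land]
    | negSucc n =>
      simp [PySem.Int.band, Int.land, sub_land_eq_ldiff, Int.negSucc_eq]; omega
  | negSucc m => cases b with
    | ofNat n =>
      simp [PySem.Int.band, Int.land, sub_land_eq_ldiff, Int.negSucc_eq]; omega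
    | negSucc n =>
      simp [PySem.Int.band, Int.land, Int.negSucc_eq]; omega

lemma pys_bor (a b : Int) : PySem.Int.bor a b = Int.lor a b := by
  cases a with
  | ofNat m => cases b with
    | ofNat n => simp [PySem.Int.bor, Int.lor]
    | negSucc n =>
      simp [PySem.Int.bor, Int.lor, sub_land_eq_ldiff, Int.negSucc_eq]; omega
  | negSucc m => cases b with
    | ofNat n =>
      simp [PySem.Int.bor, Int.lor, sub_land_eq_ldiff, Int.negSucc_eq]; omega
    | negSucc n =>
      simp [PySem.Int.bor, Int.lor, Int.negSucc_eq]; omega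

@[simp] lemma tb_bxor (a b : Int) (i : Nat) :
    (PySem.Int.bxor a b).testBit i = ((a.testBit i) ^^ (b.testBit i)) := by
  rw [pys_bxor, Int.testBit_lxor]

@[simp] lemma tb_band (a b : Int) (i : Nat) :
    (PySem.Int.band a b).testBit i = ((a.testBit i) && (b.testBit i)) := by
  rw [pys_band, Int.testBit_land]

@[simp] lemma tb_bor (a b : Int) (i : Nat) :
    (PySem.Int.bor a b).testBit i = ((a.testBit i) || (b.testBit i)) := by
  rw [pys_bor, Int.testBit_lor]

lemma nat_tb_shl' (m k i : Nat) :
    (Nat.shiftLeft' true m k).testBit i = (decide (i < k) || m.testBit (i - k)) := by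
  induction k generalizing i with
  | zero => simp [Nat.shiftLeft']
  | succ k ih =>
    rw [Nat.shiftLeft']
    cases i with
    | zero => simp
    | succ i => rw [Nat.testBit_bit_succ, ih i]; simp [Nat.succ_sub_succ]

@[simp] lemma tb_shl (x : Int) (k i : Nat) :
    (x <<< k).testBit i = (decide (k ≤ i) && x.testBit (i - k)) := by
  rw [← Int.shiftLeft_natCast_right]
  cases x with
  | ofNat m =>
    have h : (Int.ofNat m) <<< (k : Int) = Int.ofNat (m <<< k) := Int.shiftLeft_natCast m k
    rw [h]
    simp [Int.testBit, Nat.testBit_shiftLeft]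
  | negSucc m =>
    rw [Int.shiftLeft_negSucc]
    simp only [Int.testBit, nat_tb_shl']
    by_cases h : k ≤ i <;> simp [h, Nat.lt_of_not_le, Nat.not_lt_of_le]

@[simp] lemma tb_shr (x : Int) (k i : Nat) : (x >>> k).testBit i = x.testBit (k + i) := by
  cases x with
  | ofNat m =>
    have h : (Int.ofNat m) >>> k = Int.ofNat (m >>> k) := rfl
    rw [h]; simp [Int.testBit, Nat.testBit_shiftRight]
  | negSucc m =>
    have h : (Int.negSucc m) >>> k = Int.negSucc (m >>> k) := rfl
    rw [h]; simp [Int.testBit, Nat.testBit_shiftRight]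

@[simp] lemma tb_31 (i : Nat) : (31 : Int).testBit i = decide (i < 5) := by
  have h : (31 : Int).testBit i = Nat.testBit (2 ^ 5 - 1) i := rfl
  rw [h, Nat.testBit_two_pow_sub_one]

@[simp] lemma tb_8191 (i : Nat) : (8191 : Int).testBit i = decide (i < 13) := by
  have h : (8191 : Int).testBit i = Nat.testBit (2 ^ 13 - 1) i := rfl
  rw [h, Nat.testBit_two_pow_sub_one]

@[simp] lemma tb_mask (i : Nat) : (4294967295 : Int).testBit i = decide (i < 32) := by
  have h : (4294967295 : Int).testBit i = Nat.testBit (2 ^ 32 - 1) i := rfl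
  rw [h, Nat.testBit_two_pow_sub_one]

-- the two inner loops agree: chunk peeling = fixed-point refinement
lemma rec5 (x : Int) :
    PySem.Int.band
      (((PySem.List.pyRange 5 31 5).foldl
        (fun (cb : Int × Int) (pos : Int) =>
          let chunk := PySem.Int.band ((PySem.Int.bxor x (cb.1 <<< pos.toNat)) >>> pos.toNat) 0x1F
          (chunk, PySem.Int.bor cb.2 (chunk <<< pos.toNat)))
        (PySem.Int.band x 0x1F, PySem.Int.band x 0x1F)).2) 0xFFFFFFFF
    = (PySem.List.pyRange 0 7 1).foldl
        (fun (b : Int) _ => PySem.Int.band (PySem.Int.bxor x (b <<< (5:Nat))) 0xFFFFFFFF) x := by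
  have hr : PySem.List.pyRange 5 31 5 = [5, 10, 15, 20, 25, 30] := rfl
  have hr2 : PySem.List.pyRange 0 7 1 = [0, 1, 2, 3, 4, 5, 6] := rfl
  rw [hr, hr2]
  simp only [List.foldl_cons, List.foldl_nil]
  apply ibit_ext
  intro i
  by_cases h32 : i < 32
  · interval_cases i <;>
      simp [Bool.xor_comm]
  · simp [h32]

lemma rec13 (a : Int) :
    PySem.Int.band
      (((PySem.List.pyRange 13 31 13).foldl
        (fun (cb : Int × Int) (pos : Int) =>
          let c := PySem.Int.band ((PySem.Int.bxor a (cb.1 <<< pos.toNat)) >>> pos.toNat) 0x1FFF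
          (c, PySem.Int.bor cb.2 (c <<< pos.toNat)))
        (PySem.Int.band a 0x1FFF, PySem.Int.band a 0x1FFF)).2) 0xFFFFFFFF
    = (PySem.List.pyRange 0 3 1).foldl
        (fun (y : Int) _ => PySem.Int.band (PySem.Int.bxor a (y <<< (13:Nat))) 0xFFFFFFFF) a := by
  have hr : PySem.List.pyRange 13 31 13 = [13, 26] := rfl
  have hr2 : PySem.List.pyRange 0 3 1 = [0, 1, 2] := rfl
  rw [hr, hr2]
  simp only [List.foldl_cons, List.foldl_nil]
  apply ibit_ext
  intro i
  by_cases h32 : i < 32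
  · interval_cases i <;>
      simp [Bool.xor_comm]
  · simp [h32]

lemma step_eq (x : Int) : crack_dword_step x = crack_dword_alt_step x := by
  unfold crack_dword_step crack_dword_alt_step
  dsimp only
  rw [rec5]
  exact rec13 _

-- ===== VERDICT (by name: the statement is the Claim_ definition above) =====
theorem crack_dword_spec : Claim_equal_crack_dword := by
  intro buf_i _
  unfold Spec_crack_dword crack_dword crack_dword_alt
  have h : (fun (buf : Int) (_ : Int) => crack_dword_step buf)
         = (fun (buf : Int) (_ : Int) => crack_dword_alt_step buf) := by
    funext b _; exact step_eq b
  rw [h]
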